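-- pv_equiv track=rewrite | github.com/JimWallace/SPHS-Salary-Analysis | scripts/build_cv_start_year_crosswalk.py | given_name_candidates
-- ===== SOURCE A (Python) =====
-- from typing import Dict, List, Optional, Tuple
--
-- GIVEN_NAME_ALIASES = {
--     "DAVID": {"DAVE"},
--     "JAMES": {"JIM"},
--     "CHRISTOPHER": {"CHRIS"},
--     "GEOFFREY": {"GEOFF"},
--     "PHILIP": {"PHIL"},
-- }
--
-- def given_name_candidates(primary_given: str) -> List[str]:
--     if not primary_given:
--         return []
--     candidates = {primary_given}
--     if primary_given in GIVEN_NAME_ALIASES: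
--         candidates |= GIVEN_NAME_ALIASES[primary_given]
--     for formal, aliases in GIVEN_NAME_ALIASES.items():
--         if primary_given in aliases:
--             candidates.add(formal)
--             candidates |= aliases
--     return sorted(candidates)
-- ===== SOURCE B (Python) =====
-- from typing import Dict, List
--
-- # Precomputed lookup table: every name (formal or alias) maps to the complete
-- # sorted variant group it belongs to.
-- NAME_GROUPS: Dict[str, List[str]] = {
--     "DAVID": ["DAVE", "DAVID"],
--     "DAVE": ["DAVE", "DAVID"],
--     "JAMES": ["JAMES", "JIM"],
--     "JIM": ["JAMES", "JIM"],
--     "CHRISTOPHER": ["CHRIS", "CHRISTOPHER"],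
--     "CHRIS": ["CHRIS", "CHRISTOPHER"],
--     "GEOFFREY": ["GEOFF", "GEOFFREY"],
--     "GEOFF": ["GEOFF", "GEOFFREY"],
--     "PHILIP": ["PHIL", "PHILIP"],
--     "PHIL": ["PHIL", "PHILIP"],
-- }
--
-- def given_name_candidates(primary_given: str) -> List[str]:
--     if not primary_given:
--         return []
--     return NAME_GROUPS.get(primary_given, [primary_given])
-- ===== Notes on version B (the rewrite author's own statement) =====
-- stated objective: simpler
-- what changed: Replaces the per-call set building plus reverse scan over GIVEN_NAME_ALIASES with a single lookup in a precomputed NAME_GROUPS table mapping every formal name and alias to its complete sorted variant group (unknown names default to the singleton).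
import Mathlib
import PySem

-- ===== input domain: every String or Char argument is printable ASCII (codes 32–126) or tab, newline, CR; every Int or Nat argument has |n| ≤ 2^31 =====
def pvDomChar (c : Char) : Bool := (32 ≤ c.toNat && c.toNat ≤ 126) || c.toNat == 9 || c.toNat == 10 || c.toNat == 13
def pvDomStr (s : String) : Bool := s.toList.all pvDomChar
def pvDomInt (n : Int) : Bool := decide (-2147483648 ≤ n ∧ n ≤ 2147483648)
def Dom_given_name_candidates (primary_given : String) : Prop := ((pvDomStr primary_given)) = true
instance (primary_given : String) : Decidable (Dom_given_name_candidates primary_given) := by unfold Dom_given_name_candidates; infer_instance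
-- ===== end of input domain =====

-- B replaces A's per-call set building and alias-table scan with one lookup in a
-- precomputed name→sorted-variant-group table (objective: simpler).

-- ===== PORT A =====
def GIVEN_NAME_ALIASES : PySem.Dict String (PySem.Set String) :=
  PySem.Dict.mk
  [("DAVID", PySem.Set.ofList ["DAVE"]),
   ("JAMES", PySem.Set.ofList ["JIM"]),
   ("CHRISTOPHER", PySem.Set.ofList ["CHRIS"]),
   ("GEOFFREY", PySem.Set.ofList ["GEOFF"]),
   ("PHILIP", PySem.Set.ofList ["PHIL"])]

def given_name_candidates (primary_given : String) : List String :=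
  if primary_given = "" then []
  else
    let candidates := PySem.Set.ofList [primary_given]
    let candidates :=
      if PySem.Dict.contains GIVEN_NAME_ALIASES primary_given then
        PySem.Set.union candidates (PySem.Dict.getD GIVEN_NAME_ALIASES primary_given PySem.Set.empty)
      else candidates
    let candidates := GIVEN_NAME_ALIASES.items.foldl (fun c fa =>
        if PySem.Set.contains fa.2 primary_given then
          PySem.Set.union (PySem.Set.add c fa.1) fa.2
        else c) candidates
    PySem.List.sorted candidates (fun x => x) false

-- ===== PORT B =====
def NAME_GROUPS : PySem.Dict String (List String) :=
  PySem.Dict.mk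
  [("DAVID", ["DAVE", "DAVID"]), ("DAVE", ["DAVE", "DAVID"]),
   ("JAMES", ["JAMES", "JIM"]), ("JIM", ["JAMES", "JIM"]),
   ("CHRISTOPHER", ["CHRIS", "CHRISTOPHER"]), ("CHRIS", ["CHRIS", "CHRISTOPHER"]),
   ("GEOFFREY", ["GEOFF", "GEOFFREY"]), ("GEOFF", ["GEOFF", "GEOFFREY"]),
   ("PHILIP", ["PHIL", "PHILIP"]), ("PHIL", ["PHIL", "PHILIP"])]

def given_name_candidates_alt (primary_given : String) : List String :=
  if primary_given = "" then []
  else PySem.Dict.getD NAME_GROUPS primary_given [primary_given]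

-- ===== PRECONDITION & SPEC =====
def Spec_given_name_candidates (primary_given : String) (out : List String) : Prop := out = given_name_candidates_alt primary_given
instance (primary_given : String) (out : List String) : Decidable (Spec_given_name_candidates primary_given out) := by unfold Spec_given_name_candidates; infer_instance

-- ===== CLAIM (what is proved, stated in full; the proofs are below) =====
def Claim_equal_given_name_candidates : Prop := ∀ (primary_given : String), Dom_given_name_candidates primary_given → Spec_given_name_candidates primary_given (given_name_candidates primary_given)

-- ===== LEMMAS AND PROOFS =====

-- A on a known name (formal or alias) reduces to a sorted two-element set; the
-- sorted order is named via sorted_id_eq_of_perm_of_pairwise.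
theorem case_DAVID : given_name_candidates "DAVID" = given_name_candidates_alt "DAVID" := by
  have h : given_name_candidates "DAVID" = PySem.List.sorted ["DAVID", "DAVE"] (fun x => x) false := rfl
  rw [h, PySem.List.sorted_id_eq_of_perm_of_pairwise _ ["DAVE", "DAVID"] (by decide) (by simp; decide)]
  rfl

theorem case_DAVE : given_name_candidates "DAVE" = given_name_candidates_alt "DAVE" := by
  have h : given_name_candidates "DAVE" = PySem.List.sorted ["DAVE", "DAVID"] (fun x => x) false := rfl
  rw [h, PySem.List.sorted_id_eq_of_perm_of_pairwise _ ["DAVE", "DAVID"] (by decide) (by simp; decide)]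
  rfl

theorem case_JAMES : given_name_candidates "JAMES" = given_name_candidates_alt "JAMES" := by
  have h : given_name_candidates "JAMES" = PySem.List.sorted ["JAMES", "JIM"] (fun x => x) false := rfl
  rw [h, PySem.List.sorted_id_eq_of_perm_of_pairwise _ ["JAMES", "JIM"] (by decide) (by simp; decide)]
  rfl

theorem case_JIM : given_name_candidates "JIM" = given_name_candidates_alt "JIM" := by
  have h : given_name_candidates "JIM" = PySem.List.sorted ["JIM", "JAMES"] (fun x => x) false := rfl
  rw [h, PySem.List.sorted_id_eq_of_perm_of_pairwise _ ["JAMES", "JIM"] (by decide) (by simp; decide)]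
  rfl

theorem case_CHRISTOPHER : given_name_candidates "CHRISTOPHER" = given_name_candidates_alt "CHRISTOPHER" := by
  have h : given_name_candidates "CHRISTOPHER" = PySem.List.sorted ["CHRISTOPHER", "CHRIS"] (fun x => x) false := rfl
  rw [h, PySem.List.sorted_id_eq_of_perm_of_pairwise _ ["CHRIS", "CHRISTOPHER"] (by decide) (by simp; decide)]
  rfl

theorem case_CHRIS : given_name_candidates "CHRIS" = given_name_candidates_alt "CHRIS" := by
  have h : given_name_candidates "CHRIS" = PySem.List.sorted ["CHRIS", "CHRISTOPHER"] (fun x => x) false := rfl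
  rw [h, PySem.List.sorted_id_eq_of_perm_of_pairwise _ ["CHRIS", "CHRISTOPHER"] (by decide) (by simp; decide)]
  rfl

theorem case_GEOFFREY : given_name_candidates "GEOFFREY" = given_name_candidates_alt "GEOFFREY" := by
  have h : given_name_candidates "GEOFFREY" = PySem.List.sorted ["GEOFFREY", "GEOFF"] (fun x => x) false := rfl
  rw [h, PySem.List.sorted_id_eq_of_perm_of_pairwise _ ["GEOFF", "GEOFFREY"] (by decide) (by simp; decide)]
  rfl

theorem case_GEOFF : given_name_candidates "GEOFF" = given_name_candidates_alt "GEOFF" := by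
  have h : given_name_candidates "GEOFF" = PySem.List.sorted ["GEOFF", "GEOFFREY"] (fun x => x) false := rfl
  rw [h, PySem.List.sorted_id_eq_of_perm_of_pairwise _ ["GEOFF", "GEOFFREY"] (by decide) (by simp; decide)]
  rfl

theorem case_PHILIP : given_name_candidates "PHILIP" = given_name_candidates_alt "PHILIP" := by
  have h : given_name_candidates "PHILIP" = PySem.List.sorted ["PHILIP", "PHIL"] (fun x => x) false := rfl
  rw [h, PySem.List.sorted_id_eq_of_perm_of_pairwise _ ["PHIL", "PHILIP"] (by decide) (by simp; decide)]
  rfl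

theorem case_PHIL : given_name_candidates "PHIL" = given_name_candidates_alt "PHIL" := by
  have h : given_name_candidates "PHIL" = PySem.List.sorted ["PHIL", "PHILIP"] (fun x => x) false := rfl
  rw [h, PySem.List.sorted_id_eq_of_perm_of_pairwise _ ["PHIL", "PHILIP"] (by decide) (by simp; decide)]
  rfl

-- A name that is neither empty, nor a formal name, nor an alias: both sides return [p].
theorem case_other (p : String) (hp : ¬ p = "") (h1 : ¬ p = "DAVID") (h2 : ¬ p = "JAMES")
    (h3 : ¬ p = "CHRISTOPHER") (h4 : ¬ p = "GEOFFREY") (h5 : ¬ p = "PHILIP")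
    (h6 : ¬ p = "DAVE") (h7 : ¬ p = "JIM") (h8 : ¬ p = "CHRIS") (h9 : ¬ p = "GEOFF")
    (h10 : ¬ p = "PHIL") : given_name_candidates p = given_name_candidates_alt p := by
  simp [given_name_candidates, given_name_candidates_alt, GIVEN_NAME_ALIASES, NAME_GROUPS,
    hp, h1, h2, h3, h4, h5, h6, h7, h8, h9, h10, Ne.symm h1, Ne.symm h2, Ne.symm h3, Ne.symm h4, Ne.symm h5, Ne.symm h6, Ne.symm h7,
    Ne.symm h8, Ne.symm h9, Ne.symm h10,
    PySem.Dict.contains, PySem.Dict.getD, PySem.Dict.get?,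
    PySem.Set.ofList, PySem.Set.contains,
    PySem.List.sorted_eq_foldl_insertBy, PySem.List.insertBy]

-- ===== VERDICT (by name: the statement is the Claim_ definition above) =====
theorem given_name_candidates_spec : Claim_equal_given_name_candidates := by
  intro p _
  unfold Spec_given_name_candidates
  by_cases hp : p = ""
  · subst hp; rfl
  by_cases h1 : p = "DAVID"; · subst h1; exact case_DAVID
  by_cases h2 : p = "JAMES"; · subst h2; exact case_JAMES
  by_cases h3 : p = "CHRISTOPHER"; · subst h3; exact case_CHRISTOPHER
  by_cases h4 : p = "GEOFFREY"; · subst h4; exact case_GEOFFREY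
  by_cases h5 : p = "PHILIP"; · subst h5; exact case_PHILIP
  by_cases h6 : p = "DAVE"; · subst h6; exact case_DAVE
  by_cases h7 : p = "JIM"; · subst h7; exact case_JIM
  by_cases h8 : p = "CHRIS"; · subst h8; exact case_CHRIS
  by_cases h9 : p = "GEOFF"; · subst h9; exact case_GEOFF
  by_cases h10 : p = "PHIL"; · subst h10; exact case_PHIL
  exact case_other p hp h1 h2 h3 h4 h5 h6 h7 h8 h9 h10
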